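-- pv_equiv track=rewrite | github.com/jmerskine1/counterfactual-gradient-alignment | counterfactual_alignment/utilities.py | get_max_dimension_and_index
-- ===== SOURCE A (Python) =====
-- def get_max_dimension_and_index(jagged_lists):
--     max_dimension = 0
--     max_index = 0
--
--     for i, lst in enumerate(jagged_lists):
--         dimension = len(lst)
--         if dimension > max_dimension:
--             max_dimension = dimension
--             max_index = i
--
--     return max_dimension, max_index
-- ===== SOURCE B (Python) =====
-- def get_max_dimension_and_index(jagged_lists):
--     if not jagged_lists:
--         return 0, 0
--     lengths = [len(l) for l in jagged_lists]
--     m = max(lengths)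
--     return m, lengths.index(m)
-- ===== Notes on version B (the rewrite author's own statement) =====
-- stated objective: idiomatic
-- what changed: Replaces A's fused tracking loop (running max + index carried through one enumerate pass) with an empty guard, a lengths table, and two library reductions max(lengths) and lengths.index(m).
import Mathlib
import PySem

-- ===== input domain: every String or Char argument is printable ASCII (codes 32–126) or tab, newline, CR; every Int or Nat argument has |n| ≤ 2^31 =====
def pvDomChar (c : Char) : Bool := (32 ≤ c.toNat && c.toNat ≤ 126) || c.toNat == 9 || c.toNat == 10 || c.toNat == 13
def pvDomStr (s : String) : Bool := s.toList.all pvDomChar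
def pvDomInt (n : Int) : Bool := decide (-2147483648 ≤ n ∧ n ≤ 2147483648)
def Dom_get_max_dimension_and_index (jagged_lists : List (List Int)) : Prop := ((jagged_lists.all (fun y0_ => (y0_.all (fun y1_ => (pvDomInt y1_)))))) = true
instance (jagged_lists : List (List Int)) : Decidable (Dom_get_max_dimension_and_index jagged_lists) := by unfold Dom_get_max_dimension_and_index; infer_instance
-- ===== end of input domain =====

-- B replaces A's fused running-max/index loop with a lengths table plus max()/index() reductions (idiomatic, same cost).

-- ===== PORT A =====
def get_max_dimension_and_index (jagged_lists : List (List Int)) : Int × Int :=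
  (PySem.List.enumerate jagged_lists 0).foldl
    (fun (st : Int × Int) (p : Int × List Int) =>
      let dimension : Int := p.2.length
      if dimension > st.1 then (dimension, p.1) else st)
    (0, 0)

-- ===== PORT B =====
def get_max_dimension_and_index_alt (jagged_lists : List (List Int)) : Int × Int :=
  if jagged_lists = [] then (0, 0)
  else
    let lengths : List Int := jagged_lists.map (fun l => (l.length : Int))
    match PySem.List.max? lengths (fun y => y) with
    | some m => (m, (((PySem.List.index? lengths m).getD 0 : Nat) : Int))  -- m ∈ lengths, so index? never misses
    | none => (0, 0)  -- unreachable: lengths is nonempty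

-- ===== PRECONDITION & SPEC =====
def Spec_get_max_dimension_and_index (jagged_lists : List (List Int)) (out : Int × Int) : Prop := out = get_max_dimension_and_index_alt jagged_lists
instance (jagged_lists : List (List Int)) (out : Int × Int) : Decidable (Spec_get_max_dimension_and_index jagged_lists out) := by unfold Spec_get_max_dimension_and_index; infer_instance

-- ===== CLAIM (what is proved, stated in full; the proofs are below) =====
def Claim_equal_get_max_dimension_and_index : Prop := ∀ (jagged_lists : List (List Int)), Dom_get_max_dimension_and_index jagged_lists → Spec_get_max_dimension_and_index jagged_lists (get_max_dimension_and_index jagged_lists)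

-- ===== LEMMAS AND PROOFS =====

/-- A's loop, restated on the list of lengths with an explicit index counter. -/
def loopA : List Int → Int → Int × Int → Int × Int
  | [], _, st => st
  | x :: t, s, st => loopA t (s + 1) (if x > st.1 then (x, s) else st)

theorem foldA_eq_loopA (jl : List (List Int)) (s : Int) (st : Int × Int) :
    (PySem.List.enumerate jl s).foldl
      (fun (st : Int × Int) (p : Int × List Int) =>
        let dimension : Int := p.2.length
        if dimension > st.1 then (dimension, p.1) else st) st
    = loopA (jl.map (fun l => (l.length : Int))) s st := by
  induction jl generalizing s st with
  | nil => simp [PySem.List.enumerate_nil, loopA]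
  | cons x t ih => simp [PySem.List.enumerate_cons, loopA, List.foldl_cons, ih]

theorem foldl_max_eq_or_mem (xs : List Int) (d : Int) :
    xs.foldl max d = d ∨ xs.foldl max d ∈ xs := by
  induction xs generalizing d with
  | nil => left; rfl
  | cons x t ih =>
    rcases ih (max d x) with h | h
    · rcases max_cases d x with ⟨he, _⟩ | ⟨he, _⟩
      · left; simpa [he] using h
      · right; rw [he] at h; simp [List.foldl_cons, he, h]
    · right; simp [List.foldl_cons, h]

theorem le_foldl_max' (xs : List Int) (d : Int) : d ≤ xs.foldl max d := by
  induction xs generalizing d with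
  | nil => exact le_refl _
  | cons x t ih => exact le_trans (le_max_left d x) (ih (max d x))

/-- Invariant for A's loop: it computes the running max and the FIRST index achieving it. -/
theorem loopA_char (xs : List Int) (s d i : Int) :
    loopA xs s (d, i) =
      if d < xs.foldl max d
      then (xs.foldl max d, s + (((PySem.List.index? xs (xs.foldl max d)).getD 0 : Nat) : Int))
      else (d, i) := by
  induction xs generalizing s d i with
  | nil => simp [loopA]
  | cons x t ih =>
    simp only [loopA, List.foldl_cons]
    by_cases hx : x > d
    · simp only [if_pos hx]
      have hmax : max d x = x := max_eq_right (le_of_lt hx)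
      rw [hmax, ih]
      by_cases hM : x < t.foldl max x
      · have hmem : t.foldl max x ∈ t := by
          rcases foldl_max_eq_or_mem t x with h | h
          · omega
          · exact h
        have hne : x ≠ t.foldl max x := ne_of_lt hM
        obtain ⟨k, hk⟩ : ∃ k, PySem.List.index? t (t.foldl max x) = some k :=
          Option.isSome_iff_exists.mp ((PySem.List.index?_isSome_iff t _).mpr hmem)
        rw [if_pos hM, if_pos (lt_of_lt_of_le hx (le_of_lt hM)),
            PySem.List.index?_cons_of_ne t hne, hk]
        simp; omega
      · have hx' : t.foldl max x = x := le_antisymm (by omega) (le_foldl_max' t x)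
        rw [if_neg hM, hx', if_pos hx, PySem.List.index?_cons_self]
        simp
    · simp only [if_neg hx]
      have hmax : max d x = d := max_eq_left (by omega)
      rw [hmax, ih]
      by_cases hM : d < t.foldl max d
      · have hmem : t.foldl max d ∈ t := by
          rcases foldl_max_eq_or_mem t d with h | h
          · omega
          · exact h
        have hne : x ≠ t.foldl max d := by omega
        obtain ⟨k, hk⟩ : ∃ k, PySem.List.index? t (t.foldl max d) = some k :=
          Option.isSome_iff_exists.mp ((PySem.List.index?_isSome_iff t _).mpr hmem)
        rw [if_pos hM, if_pos hM, PySem.List.index?_cons_of_ne t hne, hk]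
        simp; omega
      · rw [if_neg hM, if_neg hM]

-- ===== VERDICT (by name: the statement is the Claim_ definition above) =====
theorem get_max_dimension_and_index_spec : Claim_equal_get_max_dimension_and_index := by
  intro jl _
  unfold Spec_get_max_dimension_and_index get_max_dimension_and_index get_max_dimension_and_index_alt
  rw [foldA_eq_loopA]
  cases jl with
  | nil => simp [loopA]
  | cons l t =>
    simp only [List.map_cons, if_neg (by simp : ¬ (l :: t = []))]
    rw [PySem.List.max?_id_cons, loopA_char]
    have h0 : (0 : Int) ≤ (l.length : Int) := by positivity
    have hfold : ((l.length : Int) :: t.map (fun l => (l.length : Int))).foldl max 0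
        = (t.map (fun l => (l.length : Int))).foldl max (l.length : Int) := by
      simp [List.foldl_cons]
    set M := (t.map (fun l => (l.length : Int))).foldl max (l.length : Int) with hM
    by_cases hpos : (0 : Int) < ((l.length : Int) :: t.map (fun l => (l.length : Int))).foldl max 0
    · rw [if_pos hpos, hfold]
      simp
    · rw [if_neg hpos]
      have hMl : (l.length : Int) ≤ M := le_foldl_max' _ _
      have hM0 : M = 0 := by rw [hfold] at hpos; omega
      have hl0 : (l.length : Int) = 0 := by omega
      simp [hM0, hl0]
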